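-- pv_equiv track=rewrite | github.com/baked-salmon/advent-of-code | 2025/day2/day2.py | part2
-- ===== SOURCE A (Python) =====
-- def part2(data):
--     total = 0
--     for interval in data:
--         for num in range(interval[0], interval[1] + 1):
--             length = len(str(num))
--             divisors = []
--             for i in range(1, length):
--                 if length % i == 0:
--                     divisors.append(i)
--             for i in divisors:
--                 if str(num)[:i] * (length // i) == str(num):
--                     total += num
--                     break
--     return total
-- ===== SOURCE B (Python) =====
-- def part2(data):
--     # Generate-and-filter: build the set of all "repeated block" numbers with at
--     # most as many digits as the largest interval endpoint, purely arithmetically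
--     # (block repeated q times), then sum the members falling in each interval.
--     his = [iv[1] for iv in data]
--     hi_max = max(his) if his else 0
--     ndigits = len(str(max(hi_max, 0)))
--     reps = set()
--     for length in range(2, ndigits + 1):
--         for d in range(1, length):
--             if length % d == 0:
--                 for block in range(10 ** (d - 1), 10 ** d):
--                     v = 0
--                     for _ in range(length // d):
--                         v = v * 10 ** d + block
--                     reps.add(v)
--     return sum(r for iv in data for r in reps if iv[0] <= r <= iv[1])
-- ===== Notes on version B (the rewrite author's own statement) =====
-- stated objective: faster
-- what changed: B never scans the intervals: it arithmetically generates every repeated-block number with at most as many digits as the largest interval endpoint (a base block repeated q times, no string periodicity test at all), dedupes them in a set, and sums the set members lying inside each interval.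
import Mathlib
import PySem

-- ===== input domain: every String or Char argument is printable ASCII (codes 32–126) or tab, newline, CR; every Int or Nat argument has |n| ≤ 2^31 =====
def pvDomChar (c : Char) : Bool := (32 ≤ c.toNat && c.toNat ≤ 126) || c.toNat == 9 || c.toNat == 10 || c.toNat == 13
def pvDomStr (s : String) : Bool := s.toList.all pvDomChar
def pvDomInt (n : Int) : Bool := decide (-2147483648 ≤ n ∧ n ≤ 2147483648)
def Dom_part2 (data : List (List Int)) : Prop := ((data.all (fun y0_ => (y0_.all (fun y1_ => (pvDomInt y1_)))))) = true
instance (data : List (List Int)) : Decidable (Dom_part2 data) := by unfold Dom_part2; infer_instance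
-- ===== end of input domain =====

-- B replaces A's scan of every number of every interval (with a per-number string
-- periodicity test) by arithmetic generation of all repeated-block numbers with at
-- most as many digits as the largest interval endpoint, deduped in a set and summed
-- per interval; objective: faster.

-- ===== PORT A =====
def part2 (data : List (List Int)) : Int :=
  data.foldl (fun total interval =>
    match PySem.List.pyGet? interval 0, PySem.List.pyGet? interval 1 with
    | some lo, some hi =>
      (PySem.List.pyRange lo (hi + 1) 1).foldl (fun total num =>
        let s := PySem.Int.toChars num
        let length : Int := s.length
        let divisors := (PySem.List.pyRange 1 length 1).foldl
          (fun divisors i => if PySem.Int.mod length i == 0 then divisors ++ [i] else divisors) []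
        if divisors.any (fun i =>
            PySem.List.pyRepeat (PySem.List.slice s none (some i)) (PySem.Int.floordiv length i) == s)
        then total + num
        else total) total
    | _, _ => total  -- unreachable under Pre_part2 (Python A raises IndexError here)
    ) 0

-- ===== PORT B =====
def part2_alt (data : List (List Int)) : Int :=
  let his := data.map (fun iv => PySem.List.pyGetD iv 1 0)  -- iv[1]; default unreachable under Pre_part2 (Python raises IndexError)
  let hiMax : Int := if his = [] then 0 else (PySem.List.max? his (fun x => x)).getD 0
  let ndigits : Int := ((PySem.Int.toChars (max hiMax 0)).length : Int)
  let reps : PySem.Set Int :=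
    (PySem.List.pyRange 2 (ndigits + 1) 1).foldl (fun reps len =>
      (PySem.List.pyRange 1 len 1).foldl (fun reps d =>
        if PySem.Int.mod len d == 0 then
          -- inside these ranges d ≥ 1 and len ≥ 2, so the .toNat on the exponents is exact
          (PySem.List.pyRange (10 ^ (d - 1).toNat) (10 ^ d.toNat) 1).foldl (fun reps block =>
            PySem.Set.add reps
              ((PySem.List.pyRange 0 (PySem.Int.floordiv len d) 1).foldl
                (fun v _ => v * 10 ^ d.toNat + block) 0)) reps
        else reps) reps) PySem.Set.empty
  (data.map (fun iv =>
    (reps.filter (fun r =>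
      decide (PySem.List.pyGetD iv 0 0 ≤ r ∧ r ≤ PySem.List.pyGetD iv 1 0))).sum)).sum

-- ===== PRECONDITION & SPEC =====
-- Pre_ excludes exactly the inputs where both Pythons raise IndexError: an inner list
-- with fewer than two elements.
def Pre_part2 (data : List (List Int)) : Prop :=
  ∀ interval ∈ data, 2 ≤ interval.length
instance (data : List (List Int)) : Decidable (Pre_part2 data) := by unfold Pre_part2; infer_instance

def pvWitness_part2 : List (List Int) := [[1, 25], [95, 121]]

def Spec_part2 (data : List (List Int)) (out : Int) : Prop := out = part2_alt data
instance (data : List (List Int)) (out : Int) : Decidable (Spec_part2 data out) := by unfold Spec_part2; infer_instance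

-- ===== CLAIM (what is proved, stated in full; the proofs are below) =====
def Claim_equal_part2 : Prop := ∀ (data : List (List Int)), Dom_part2 data → Pre_part2 data → Spec_part2 data (part2 data)

-- ===== LEMMAS AND PROOFS =====

def dstr (n : Nat) : List Char :=
  if _h : n < 10 then [Nat.digitChar n]
  else dstr (n / 10) ++ [Nat.digitChar (n % 10)]
decreasing_by exact Nat.div_lt_self (by omega) (by omega)

def dval (l : List Char) : Nat := l.foldl (fun a c => 10 * a + (c.toNat - 48)) 0
def IsDigit (c : Char) : Prop := 48 ≤ c.toNat ∧ c.toNat ≤ 57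

theorem dstr_lt (n : Nat) (h : n < 10) : dstr n = [Nat.digitChar n] := by
  rw [dstr]; simp [h]

theorem dstr_ge (n : Nat) (h : ¬ n < 10) : dstr n = dstr (n / 10) ++ [Nat.digitChar (n % 10)] := by
  rw [dstr]; simp [h]

theorem digitChar_toNat (m : Nat) (h : m < 10) : (Nat.digitChar m).toNat = 48 + m := by
  interval_cases m <;> rfl

theorem digitChar_of_toNat (c : Char) (h1 : 48 ≤ c.toNat) (h2 : c.toNat ≤ 57) :
    Nat.digitChar (c.toNat - 48) = c := by
  have hv : c.toNat - 48 < 10 := by omega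
  have h3 : (Nat.digitChar (c.toNat - 48)).toNat = c.toNat := by
    rw [digitChar_toNat (c.toNat - 48) hv]; omega
  exact Char.ext (UInt32.toNat_inj.mp h3)

theorem toDigitsCore_eq_dstr (f : Nat) : ∀ (n : Nat) (acc : List Char), 1 ≤ f → n < 10 ^ f →
    Nat.toDigitsCore 10 f n acc = dstr n ++ acc := by
  induction f with
  | zero => intro n acc hf h; omega
  | succ f ih =>
    intro n acc _ h
    rw [Nat.toDigitsCore]
    by_cases h10 : n / 10 = 0
    · have : n < 10 := by omega
      simp [h10, dstr_lt n this, Nat.mod_eq_of_lt this]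
    · simp only [h10, if_false]
      have hn10 : 10 ≤ n := by
        rcases Nat.lt_or_ge n 10 with h' | h'
        · exact absurd (Nat.div_eq_of_lt h') h10
        · exact h'
      have hf1 : 1 ≤ f := by
        by_contra hc
        have : f = 0 := by omega
        subst this
        simp at h
        omega
      rw [ih (n / 10) _ hf1 (by
        have hp : (10:Nat) ^ (f+1) = 10 ^ f * 10 := by ring
        omega)]
      rw [dstr_ge n (by omega)]
      simp

theorem toChars_natCast (n : Nat) : PySem.Int.toChars (n : Int) = dstr n := by
  have : ¬ ((n : Int) < 0) := by omega
  simp only [PySem.Int.toChars, this, if_false, Int.toNat_natCast]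
  rw [Nat.toDigits]
  rw [toDigitsCore_eq_dstr (n + 1) n [] (by omega) (by
    calc n < 2 ^ n * 1 := by have := Nat.lt_two_pow_self (n := n); omega
    _ ≤ 10 ^ n * 10 := by
        apply Nat.mul_le_mul
        · exact Nat.pow_le_pow_left (by omega) n
        · omega
    _ = 10 ^ (n+1) := by ring)]
  simp

theorem dstr_ne_nil (n : Nat) : dstr n ≠ [] := by
  by_cases h : n < 10
  · rw [dstr_lt n h]; simp
  · rw [dstr_ge n h]; simp

theorem dval_append_singleton (l : List Char) (c : Char) :
    dval (l ++ [c]) = 10 * dval l + (c.toNat - 48) := by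
  simp [dval, List.foldl_append]

theorem dval_dstr (n : Nat) : dval (dstr n) = n := by
  induction n using Nat.strong_induction_on with
  | _ n ih =>
    by_cases h : n < 10
    · rw [dstr_lt n h]
      simp [dval, digitChar_toNat n h]
    · rw [dstr_ge n h, dval_append_singleton, ih (n / 10) (Nat.div_lt_self (by omega) (by omega)),
        digitChar_toNat (n % 10) (Nat.mod_lt _ (by omega))]
      omega

theorem dstr_digits (n : Nat) : ∀ c ∈ dstr n, IsDigit c := by
  induction n using Nat.strong_induction_on with
  | _ n ih =>
    by_cases h : n < 10
    · rw [dstr_lt n h]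
      intro c hc
      simp at hc
      subst hc
      constructor <;> rw [digitChar_toNat n h] <;> omega
    · rw [dstr_ge n h]
      intro c hc
      rcases List.mem_append.mp hc with h1 | h1
      · exact ih (n / 10) (Nat.div_lt_self (by omega) (by omega)) c h1
      · simp at h1
        subst h1
        have hlt := Nat.mod_lt n (y := 10) (by omega)
        constructor <;> rw [digitChar_toNat _ hlt] <;> omega

theorem dstr_head_pos (n : Nat) (hn : 1 ≤ n) :
    ∃ c t, dstr n = c :: t ∧ 49 ≤ c.toNat ∧ c.toNat ≤ 57 := by
  induction n using Nat.strong_induction_on with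
  | _ n ih =>
    by_cases h : n < 10
    · refine ⟨Nat.digitChar n, [], by rw [dstr_lt n h], ?_, ?_⟩ <;> rw [digitChar_toNat n h] <;> omega
    · obtain ⟨c, t, hct, h1, h2⟩ := ih (n / 10) (Nat.div_lt_self (by omega) (by omega)) (by omega)
      exact ⟨c, t ++ [Nat.digitChar (n % 10)], by rw [dstr_ge n h, hct]; rfl, h1, h2⟩

theorem dval_foldl_ge (l : List Char) : ∀ a : Nat,
    a * 10 ^ l.length ≤ l.foldl (fun a c => 10 * a + (c.toNat - 48)) a := by
  induction l with
  | nil => intro a; simp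
  | cons c r ih =>
    intro a
    calc a * 10 ^ (c :: r).length = (10 * a) * 10 ^ r.length := by
          simp [List.length_cons]; ring
      _ ≤ (10 * a + (c.toNat - 48)) * 10 ^ r.length := by
          apply Nat.mul_le_mul_right; omega
      _ ≤ _ := ih _

theorem dval_lt (t : List Char) (h : ∀ c ∈ t, IsDigit c) : dval t < 10 ^ t.length := by
  induction t using List.reverseRecOn with
  | nil => simp [dval]
  | append_singleton l c ih =>
    rw [dval_append_singleton]
    have hc := h c (by simp)
    have hl : dval l < 10 ^ l.length := ih (fun c' hc' => h c' (by simp [hc']))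
    have : (c.toNat - 48) < 10 := by rcases hc with ⟨_, _⟩; omega
    calc 10 * dval l + (c.toNat - 48) < 10 * dval l + 10 := by omega
      _ ≤ 10 * 10 ^ l.length := by omega
      _ = 10 ^ (l ++ [c]).length := by simp [List.length_append]; ring

theorem le_dval (c : Char) (r : List Char) (hc : 49 ≤ c.toNat) :
    10 ^ r.length ≤ dval (c :: r) := by
  have : dval (c :: r) = r.foldl (fun a c => 10 * a + (c.toNat - 48)) (c.toNat - 48) := by
    simp [dval]
  rw [this]
  calc 10 ^ r.length = 1 * 10 ^ r.length := by omega
    _ ≤ (c.toNat - 48) * 10 ^ r.length := by apply Nat.mul_le_mul_right; omega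
    _ ≤ _ := dval_foldl_ge r _

theorem dval_pos (c : Char) (r : List Char) (hc : 49 ≤ c.toNat) : 1 ≤ dval (c :: r) := by
  have := le_dval c r hc
  have : 1 ≤ 10 ^ r.length := Nat.one_le_pow _ _ (by omega)
  omega

theorem dstr_dval (t : List Char) : t ≠ [] → (∀ c ∈ t, IsDigit c) →
    (∀ c r, t = c :: r → 49 ≤ c.toNat) → dstr (dval t) = t := by
  induction t using List.reverseRecOn with
  | nil => intro h; exact absurd rfl h
  | append_singleton l c ih =>
    intro _ hdig hhead
    rcases List.eq_nil_or_concat' l with rfl | ⟨l', c', rfl⟩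
    · have hc := hdig c (by simp)
      have h49 : 49 ≤ c.toNat := hhead c [] rfl
      simp only [List.nil_append]
      rw [show dval [c] = c.toNat - 48 by simp [dval]]
      rw [dstr_lt _ (by rcases hc with ⟨_, _⟩; omega)]
      rw [digitChar_of_toNat c hc.1 hc.2]
    · set l := l' ++ [c'] with hl
      have hlne : l ≠ [] := by simp [hl]
      have hdigl : ∀ d ∈ l, IsDigit d := fun d hd => hdig d (by simp [hd])
      have hheadl : ∀ d r, l = d :: r → 49 ≤ d.toNat := by
        intro d r hdr
        exact hhead d (r ++ [c]) (by rw [← List.cons_append, ← hdr])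
      have hvl : 1 ≤ dval l := by
        obtain ⟨d, r, hdr⟩ := List.exists_cons_of_ne_nil hlne
        exact hdr ▸ dval_pos d r (hheadl d r hdr)
      have hc := hdig c (by simp)
      have hcv : c.toNat - 48 < 10 := by rcases hc with ⟨_, _⟩; omega
      rw [dval_append_singleton]
      rw [dstr_ge _ (by omega)]
      have hdiv : (10 * dval l + (c.toNat - 48)) / 10 = dval l := by omega
      have hmod : (10 * dval l + (c.toNat - 48)) % 10 = c.toNat - 48 := by omega
      rw [hdiv, hmod, ih hlne hdigl hheadl, digitChar_of_toNat c hc.1 hc.2]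

theorem length_dstr_le (n e : Nat) (he : 1 ≤ e) (h : n < 10 ^ e) : (dstr n).length ≤ e := by
  induction e generalizing n with
  | zero => omega
  | succ e ih =>
    by_cases h10 : n < 10
    · rw [dstr_lt n h10]; simp
    · have he1 : 1 ≤ e := by
        by_contra hc
        have : e = 0 := by omega
        subst this
        simp at h
        omega
      rw [dstr_ge n h10]
      have : n / 10 < 10 ^ e := by
        have hp : (10:Nat) ^ (e+1) = 10 ^ e * 10 := by ring
        omega
      have := ih (n / 10) he1 this
      simp [List.length_append]
      omega

theorem lt_pow_length_dstr (n : Nat) : n < 10 ^ (dstr n).length := by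
  have h1 := dval_lt (dstr n) (dstr_digits n)
  rwa [dval_dstr] at h1

theorem pow_length_dstr_le (n : Nat) (hn : 1 ≤ n) : 10 ^ ((dstr n).length - 1) ≤ n := by
  obtain ⟨c, t, hct, h1, _⟩ := dstr_head_pos n hn
  have := le_dval c t h1
  rw [← hct, dval_dstr] at this
  have hlen : (dstr n).length = t.length + 1 := by rw [hct]; simp
  rw [hlen]
  simpa using this

theorem length_dstr_pos (n : Nat) : 1 ≤ (dstr n).length :=
  List.length_pos_of_ne_nil (dstr_ne_nil n)

theorem length_dstr_mono (n m : Nat) (h : n ≤ m) : (dstr n).length ≤ (dstr m).length := by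
  rcases Nat.eq_zero_or_pos n with rfl | hn
  · rw [dstr_lt 0 (by omega)]
    simpa using length_dstr_pos m
  · by_contra hc
    rw [not_le] at hc
    have h1 := pow_length_dstr_le n hn
    have h2 := lt_pow_length_dstr m
    have h3 : 10 ^ (dstr m).length ≤ 10 ^ ((dstr n).length - 1) :=
      Nat.pow_le_pow_right (by omega) (by omega)
    omega

theorem length_dstr_of_bounds (b d : Nat) (hd : 1 ≤ d) (h1 : 10 ^ (d - 1) ≤ b)
    (h2 : b < 10 ^ d) : (dstr b).length = d := by
  have hb1 : 1 ≤ b := le_trans (Nat.one_le_pow _ _ (by omega)) h1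
  have hle := length_dstr_le b d hd h2
  have hge := pow_length_dstr_le b hb1
  have hlt := lt_pow_length_dstr b
  by_contra hc
  have hlen : (dstr b).length ≤ d - 1 := by omega
  have : 10 ^ (d-1) ≤ 10 ^ (d-1) := le_refl _
  have h4 : b < 10 ^ (d - 1) := lt_of_lt_of_le hlt (Nat.pow_le_pow_right (by omega) hlen)
  omega

theorem dstr_append (d : Nat) : ∀ a b : Nat, 1 ≤ a → 1 ≤ d →
    10 ^ (d - 1) ≤ b → b < 10 ^ d → dstr (a * 10 ^ d + b) = dstr a ++ dstr b := by
  induction d with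
  | zero => intro a b _ hd; omega
  | succ d ih =>
    intro a b ha _ h1 h2
    by_cases hd0 : d = 0
    · subst hd0
      have hb10 : b < 10 := by simpa using h2
      have hge : ¬ (a * 10 ^ 1 + b < 10) := by
        simp only [pow_one]
        omega
      rw [dstr_ge _ hge]
      have hdiv : (a * 10 ^ 1 + b) / 10 = a := by simp [pow_one]; omega
      have hmod : (a * 10 ^ 1 + b) % 10 = b := by simp [pow_one]; omega
      rw [hdiv, hmod, dstr_lt b hb10]
    · have hd1 : 1 ≤ d := by omega
      have hb10 : 10 ≤ b := by
        calc 10 = 10 ^ 1 := by ring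
          _ ≤ 10 ^ (d + 1 - 1) := Nat.pow_le_pow_right (by omega) (by omega)
          _ ≤ b := h1
      have hge : ¬ (a * 10 ^ (d+1) + b < 10) := by omega
      rw [dstr_ge _ hge]
      have hc10 : a * 10 ^ (d+1) + b = 10 * (a * 10 ^ d) + b := by ring
      have hdiv : (a * 10 ^ (d+1) + b) / 10 = a * 10 ^ d + b / 10 := by omega
      have hmod : (a * 10 ^ (d+1) + b) % 10 = b % 10 := by omega
      have hb1 : 10 ^ (d - 1) ≤ b / 10 := by
        have hp : (10:Nat) ^ (d + 1 - 1) = 10 * 10 ^ (d - 1) := by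
          rw [show d + 1 - 1 = (d - 1) + 1 by omega]; ring
        rw [hp] at h1
        omega
      have hb2 : b / 10 < 10 ^ d := by
        have hp : (10:Nat) ^ (d+1) = 10 * 10 ^ d := by ring
        rw [hp] at h2
        omega
      rw [hdiv, hmod, ih a (b / 10) ha hd1 hb1 hb2]
      rw [dstr_ge b (by omega)]
      simp

def repValN (b d : Nat) : Nat → Nat
  | 0 => 0
  | q + 1 => repValN b d q * 10 ^ d + b

theorem repValN_pos (b d q : Nat) (hb : 1 ≤ b) (hq : 1 ≤ q) : 1 ≤ repValN b d q := by
  cases q with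
  | zero => omega
  | succ q => simp only [repValN]; omega

theorem flatten_rep_comm {α : Type} (b : List α) (n : Nat) :
    (List.replicate n b).flatten ++ b = b ++ (List.replicate n b).flatten := by
  induction n with
  | zero => simp
  | succ n ih => simp only [List.replicate_succ, List.flatten_cons, List.append_assoc, ih]

theorem dstr_repValN (b d : Nat) (hd : 1 ≤ d) (h1 : 10 ^ (d - 1) ≤ b) (h2 : b < 10 ^ d) :
    ∀ q, 1 ≤ q → dstr (repValN b d q) = (List.replicate q (dstr b)).flatten := by
  intro q
  induction q with
  | zero => omega
  | succ q ih =>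
    intro _
    rcases Nat.eq_zero_or_pos q with rfl | hq
    · simp [repValN]
    · have hb1 : 1 ≤ b := le_trans (Nat.one_le_pow _ _ (by omega)) h1
      have ha : 1 ≤ repValN b d q := repValN_pos b d q hb1 hq
      show dstr (repValN b d q * 10 ^ d + b) = _
      rw [dstr_append d (repValN b d q) b ha hd h1 h2, ih hq]
      rw [List.replicate_succ, List.flatten_cons, flatten_rep_comm]

theorem length_flatten_replicate {α : Type} (q : Nat) (t : List α) :
    (List.replicate q t).flatten.length = q * t.length := by
  simp [List.length_flatten, List.map_replicate, List.sum_replicate, smul_eq_mul]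

def RepN (m : Nat) : Prop :=
  ∃ d q b, 1 ≤ d ∧ 2 ≤ q ∧ 10 ^ (d - 1) ≤ b ∧ b < 10 ^ d ∧ m = repValN b d q

theorem length_dstr_of_RepN (m d q b : Nat) (hd : 1 ≤ d) (hq : 2 ≤ q)
    (h1 : 10 ^ (d - 1) ≤ b) (h2 : b < 10 ^ d) (hm : m = repValN b d q) :
    (dstr m).length = q * d := by
  rw [hm, dstr_repValN b d hd h1 h2 q (by omega), length_flatten_replicate,
    length_dstr_of_bounds b d hd h1 h2]

def repTestA (num : Int) : Bool :=
  let s := PySem.Int.toChars num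
  let length : Int := s.length
  let divisors := (PySem.List.pyRange 1 length 1).foldl
    (fun divisors i => if PySem.Int.mod length i == 0 then divisors ++ [i] else divisors) []
  divisors.any (fun i =>
    PySem.List.pyRepeat (PySem.List.slice s none (some i)) (PySem.Int.floordiv length i) == s)

theorem repTestA_eq_any (num : Int) :
    repTestA num = (PySem.List.pyRange 1 ((PySem.Int.toChars num).length : Int) 1).any
      (fun i => (PySem.Int.mod ((PySem.Int.toChars num).length : Int) i == 0) &&
        (PySem.List.pyRepeat (PySem.List.slice (PySem.Int.toChars num) none (some i))
          (PySem.Int.floordiv ((PySem.Int.toChars num).length : Int) i) == PySem.Int.toChars num)) := by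
  simp only [repTestA]
  rw [PySem.List.foldl_append_if_eq_filter, List.nil_append, List.any_filter]

-- the periodicity condition for one admissible i, in Nat terms
theorem period_iff (s : List Char) (i : Int) (h1 : 1 ≤ i) :
    (PySem.List.pyRepeat (PySem.List.slice s none (some i))
      (PySem.Int.floordiv ((s.length : Int)) i) = s) ↔
    (List.replicate (s.length / i.toNat) (s.take i.toNat)).flatten = s := by
  have hi : i = ((i.toNat : Nat) : Int) := (Int.toNat_of_nonneg (by omega)).symm
  rw [hi, PySem.List.slice_to_natCast]
  unfold PySem.List.pyRepeat
  rw [hi, PySem.Int.floordiv_natCast, Int.toNat_natCast]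
  simp

theorem toChars_neg (n : Int) (h : n < 0) :
    PySem.Int.toChars n = '-' :: dstr n.natAbs := by
  simp only [PySem.Int.toChars, h, if_true]
  rw [Nat.toDigits, toDigitsCore_eq_dstr _ _ _ (by omega) (by
    calc n.natAbs < 2 ^ n.natAbs * 1 := by have := Nat.lt_two_pow_self (n := n.natAbs); omega
    _ ≤ 10 ^ n.natAbs * 10 := Nat.mul_le_mul (Nat.pow_le_pow_left (by omega) _) (by omega)
    _ = 10 ^ (n.natAbs + 1) := by ring)]
  simp

theorem repTestA_neg_false (n : Int) (hn : n < 0) : repTestA n = false := by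
  rw [repTestA_eq_any]
  by_contra hc
  rw [Bool.not_eq_false, List.any_eq_true] at hc
  obtain ⟨i, hmem, hcond⟩ := hc
  rw [PySem.List.mem_pyRange_one] at hmem
  obtain ⟨hi1, hi2⟩ := hmem
  rw [Bool.and_eq_true, beq_iff_eq, beq_iff_eq] at hcond
  obtain ⟨hmod, hrep⟩ := hcond
  rw [PySem.Int.mod_eq_zero_iff_dvd] at hmod
  rw [period_iff _ i hi1] at hrep
  set s := PySem.Int.toChars n with hs
  set k := i.toNat with hk
  set q := s.length / k with hq
  have hk1 : 1 ≤ k := by omega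
  have hkl : k < s.length := by omega
  have hq2 : 2 ≤ q := by
    have hik : i = ((k : Nat) : Int) := (Int.toNat_of_nonneg (by omega)).symm
    have hdvd : k ∣ s.length := by
      rw [hik] at hmod
      exact_mod_cast hmod
    obtain ⟨c, hc⟩ := hdvd
    have : 2 ≤ c := by nlinarith
    rw [hq, hc, Nat.mul_div_cancel_left _ (by omega)]
    omega
  -- s = t ++ t ++ rest with t = s.take k starting with '-'
  have hsplit : ∃ rest, s = s.take k ++ (s.take k ++ rest) := by
    refine ⟨(List.replicate (q - 2) (s.take k)).flatten, ?_⟩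
    conv_lhs => rw [← hrep]
    rw [show q = (q - 2) + 1 + 1 by omega]
    simp [List.replicate_succ, List.flatten_cons]
  obtain ⟨rest, hsp⟩ := hsplit
  have hcons : s = '-' :: dstr n.natAbs := toChars_neg n hn
  have htk : ∃ tt, s.take k = '-' :: tt := by
    rcases hk1.lt_or_eq with h | h
    · exact ⟨(dstr n.natAbs).take (k - 1), by rw [hcons, show k = (k-1)+1 by omega]; rfl⟩
    · exact ⟨(dstr n.natAbs).take (k - 1), by rw [hcons, show k = (k-1)+1 by omega]; rfl⟩
  obtain ⟨tt, htt⟩ := htk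
  have hmemneg : '-' ∈ dstr n.natAbs := by
    have : '-' ∈ s.drop 1 := by
      rw [hsp, htt]
      simp
    rw [hcons] at this
    simpa using this
  have := dstr_digits n.natAbs '-' hmemneg
  rcases this with ⟨h48, h57⟩
  simp [Char.toNat] at h48

theorem toChars_nonneg (n : Int) (h : 0 ≤ n) : PySem.Int.toChars n = dstr n.toNat := by
  have hn : n = ((n.toNat : Nat) : Int) := (Int.toNat_of_nonneg h).symm
  rw [hn, toChars_natCast, Int.toNat_natCast]

theorem repTestA_iff (n : Int) : repTestA n = true ↔ 0 ≤ n ∧ RepN n.toNat := by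
  constructor
  · intro h
    rcases Int.lt_or_le n 0 with hneg | hpos
    · rw [repTestA_neg_false n hneg] at h; exact absurd h (by simp)
    refine ⟨hpos, ?_⟩
    rw [repTestA_eq_any, List.any_eq_true] at h
    obtain ⟨i, hmem, hcond⟩ := h
    rw [PySem.List.mem_pyRange_one] at hmem
    obtain ⟨hi1, hi2⟩ := hmem
    rw [Bool.and_eq_true, beq_iff_eq, beq_iff_eq] at hcond
    obtain ⟨hmod, hrep⟩ := hcond
    rw [PySem.Int.mod_eq_zero_iff_dvd] at hmod
    rw [period_iff _ i hi1] at hrep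
    set s := PySem.Int.toChars n with hs
    set m := n.toNat with hm
    have hsd : s = dstr m := toChars_nonneg n hpos
    set k := i.toNat with hk
    have hk1 : 1 ≤ k := by omega
    have hkl : k < s.length := by omega
    have hik : i = ((k : Nat) : Int) := (Int.toNat_of_nonneg (by omega)).symm
    have hkdvd : k ∣ s.length := by
      rw [hik] at hmod
      exact_mod_cast hmod
    set q := s.length / k with hq
    have hq2 : 2 ≤ q := by
      obtain ⟨c, hc⟩ := hkdvd
      have : 2 ≤ c := by nlinarith
      rw [hq, hc, Nat.mul_div_cancel_left _ (by omega)]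
      omega
    have hm1 : 1 ≤ m := by
      by_contra hc
      have : m = 0 := by omega
      rw [this, dstr_lt 0 (by omega)] at hsd
      rw [hsd] at hkl
      simp at hkl
      omega
    set t := s.take k with ht
    have hlt : t.length = k := by
      rw [ht, List.length_take]
      omega
    have htdig : ∀ c ∈ t, IsDigit c := fun c hc =>
      dstr_digits m c (by rw [← hsd]; exact List.mem_of_mem_take hc)
    obtain ⟨c0, t0, hct, hc49, hc57⟩ := dstr_head_pos m hm1
    have htc : ∃ r, t = c0 :: r := by
      refine ⟨(t0.take (k - 1)), ?_⟩
      rw [ht, hsd, hct, show k = (k-1)+1 by omega]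
      rfl
    obtain ⟨r, hr⟩ := htc
    have hthead : ∀ c' r', t = c' :: r' → 49 ≤ c'.toNat := by
      intro c' r' h'
      rw [hr] at h'
      cases h'
      exact hc49
    set b := dval t with hb
    have hdb : dstr b = t := dstr_dval t (by rw [hr]; simp) htdig hthead
    have hblt : b < 10 ^ k := by
      have := dval_lt t htdig
      rwa [hlt] at this
    have hbge : 10 ^ (k - 1) ≤ b := by
      have := le_dval c0 r hc49
      rw [← hr] at this
      have hrl : r.length = k - 1 := by
        have : t.length = r.length + 1 := by rw [hr]; simp
        omega
      rwa [hrl] at this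
    refine ⟨k, q, b, hk1, hq2, hbge, hblt, ?_⟩
    have h1 : dstr (repValN b k q) = (List.replicate q (dstr b)).flatten :=
      dstr_repValN b k hk1 hbge hblt q (by omega)
    rw [hdb] at h1
    rw [hrep, hsd] at h1
    have := congrArg dval h1
    rwa [dval_dstr, dval_dstr, eq_comm] at this
  · rintro ⟨hpos, d, q, b, hd, hq, hb1, hb2, hm⟩
    rw [repTestA_eq_any, List.any_eq_true]
    set s := PySem.Int.toChars n with hs
    have hsd : s = dstr n.toNat := toChars_nonneg n hpos
    have hrep : s = (List.replicate q (dstr b)).flatten := by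
      rw [hsd, hm, dstr_repValN b d hd hb1 hb2 q (by omega)]
    have hlenb : (dstr b).length = d := length_dstr_of_bounds b d hd hb1 hb2
    have hlens : s.length = q * d := by
      rw [hrep, length_flatten_replicate, hlenb]
    refine ⟨(d : Int), ?_, ?_⟩
    · rw [PySem.List.mem_pyRange_one]
      constructor
      · exact_mod_cast hd
      · rw [hlens]
        have : d < q * d := by
          have h2d : 2 * d ≤ q * d := Nat.mul_le_mul_right d hq
          omega
        exact_mod_cast this
    · rw [Bool.and_eq_true, beq_iff_eq, beq_iff_eq]
      constructor
      · rw [PySem.Int.mod_eq_zero_iff_dvd, hlens]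
        exact ⟨(q : Int), by push_cast; ring⟩
      · rw [period_iff s (d : Int) (by exact_mod_cast hd)]
        rw [Int.toNat_natCast, hlens, Nat.mul_div_cancel _ (by omega)]
        have htake : s.take d = dstr b := by
          conv_lhs => rw [hrep, show q = (q-1)+1 by omega, List.replicate_succ, List.flatten_cons]
          rw [← hlenb, List.take_left]
        rw [htake, ← hrep]

theorem mem_foldl_addlike {β : Type} (l : List β) (F : PySem.Set Int → β → PySem.Set Int)
    (P : β → Int → Prop) (hF : ∀ s b y, y ∈ F s b ↔ y ∈ s ∨ P b y) :
    ∀ (s : PySem.Set Int) (y : Int), y ∈ l.foldl F s ↔ y ∈ s ∨ ∃ b ∈ l, P b y := by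
  induction l with
  | nil => intro s y; simp
  | cons b rest ih =>
    intro s y
    rw [List.foldl_cons, ih, hF]
    constructor
    · rintro (⟨h | h⟩ | ⟨b', hb', h⟩)
      · exact Or.inl h
      · exact Or.inr ⟨b, by simp, h⟩
      · exact Or.inr ⟨b', by simp [hb'], h⟩
    · rintro (h | ⟨b', hb', h⟩)
      · exact Or.inl (Or.inl h)
      · rcases List.mem_cons.mp hb' with rfl | hb''
        · exact Or.inl (Or.inr h)
        · exact Or.inr ⟨b', hb'', h⟩

theorem nodup_foldl_of_step {β : Type} (l : List β) (F : PySem.Set Int → β → PySem.Set Int)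
    (hF : ∀ s b, List.Nodup s → List.Nodup (F s b)) :
    ∀ s : PySem.Set Int, List.Nodup s → List.Nodup (l.foldl F s) := by
  induction l with
  | nil => intro s hs; exact hs
  | cons b rest ih => intro s hs; exact ih _ (hF s b hs)

theorem foldl_ignore_iterate {α β : Type} (g : α → α) (l : List β) :
    ∀ init, l.foldl (fun v _ => g v) init = g^[l.length] init := by
  induction l with
  | nil => intro init; simp
  | cons b rest ih =>
    intro init
    rw [List.foldl_cons, ih, List.length_cons, Function.iterate_succ_apply]

theorem iterate_repValN (dn : Nat) (blk : Nat) :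
    ∀ k, (fun v : Int => v * 10 ^ dn + (blk : Int))^[k] 0 = ((repValN blk dn k : Nat) : Int) := by
  intro k
  induction k with
  | zero => simp [repValN]
  | succ k ih =>
    rw [Function.iterate_succ_apply', ih]
    show _ = ((repValN blk dn k * 10 ^ dn + blk : Nat) : Int)
    push_cast
    ring

theorem length_pyRange_nonneg (q : Int) : (PySem.List.pyRange 0 q 1).length = q.toNat := by
  unfold PySem.List.pyRange
  rw [if_neg (by norm_num : ¬ (1:Int) = 0)]
  by_cases hq : (0:Int) < q
  · rw [if_pos (by norm_num : (0:Int) < 1), if_pos hq, List.length_map, List.length_range]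
    omega
  · rw [if_pos (by norm_num : (0:Int) < 1), if_neg hq, List.length_map, List.length_range]
    omega

theorem nodup_pyRange_one (a b : Int) : (PySem.List.pyRange a b 1).Nodup := by
  unfold PySem.List.pyRange
  simp only [if_neg (by norm_num : ¬ (1:Int) = 0)]
  split_ifs <;> try exact List.nodup_nil
  all_goals
    refine List.Nodup.map (fun x y h => by omega) List.nodup_range

theorem val_eq (len d blk : Int) (hd : 1 ≤ d) (hlen : 0 ≤ len) (hblk : 0 ≤ blk) :
    (PySem.List.pyRange 0 (PySem.Int.floordiv len d) 1).foldl
      (fun v _ => v * 10 ^ d.toNat + blk) 0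
    = ((repValN blk.toNat d.toNat (len.toNat / d.toNat) : Nat) : Int) := by
  rw [foldl_ignore_iterate, length_pyRange_nonneg]
  have hblk' : blk = ((blk.toNat : Nat) : Int) := (Int.toNat_of_nonneg hblk).symm
  have hfd : PySem.Int.floordiv len d = ((len.toNat / d.toNat : Nat) : Int) := by
    conv_lhs => rw [(Int.toNat_of_nonneg hlen).symm, (Int.toNat_of_nonneg (by omega : (0:Int) ≤ d)).symm]
    rw [PySem.Int.floordiv_natCast]
  rw [hfd, Int.toNat_natCast]
  conv_lhs => rw [hblk']
  exact iterate_repValN d.toNat blk.toNat (len.toNat / d.toNat)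

theorem mem_reps_iff (nd : Int) (y : Int) :
    (y ∈ (PySem.List.pyRange 2 (nd + 1) 1).foldl (fun reps len =>
      (PySem.List.pyRange 1 len 1).foldl (fun reps d =>
        if PySem.Int.mod len d == 0 then
          (PySem.List.pyRange (10 ^ (d - 1).toNat) (10 ^ d.toNat) 1).foldl (fun reps block =>
            PySem.Set.add reps
              ((PySem.List.pyRange 0 (PySem.Int.floordiv len d) 1).foldl
                (fun v _ => v * 10 ^ d.toNat + block) 0)) reps
        else reps) reps) PySem.Set.empty)
    ↔ (0 ≤ y ∧ RepN y.toNat ∧ ((dstr y.toNat).length : Int) ≤ nd) := by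
  rw [mem_foldl_addlike _ _
    (fun len y => ∃ d ∈ (PySem.List.pyRange 1 len 1).filter
        (fun d => PySem.Int.mod len d == 0),
      ∃ blk ∈ PySem.List.pyRange (10 ^ (d - 1).toNat) (10 ^ d.toNat) 1,
        y = (PySem.List.pyRange 0 (PySem.Int.floordiv len d) 1).foldl
          (fun v _ => v * 10 ^ d.toNat + blk) 0)
    (by
      intro s len y
      rw [PySem.List.foldl_if_eq_foldl_filter
        (fun d => PySem.Int.mod len d == 0)
        (fun reps d =>
          (PySem.List.pyRange (10 ^ (d - 1).toNat) (10 ^ d.toNat) 1).foldl (fun reps block =>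
            PySem.Set.add reps
              ((PySem.List.pyRange 0 (PySem.Int.floordiv len d) 1).foldl
                (fun v _ => v * 10 ^ d.toNat + block) 0)) reps)]
      exact mem_foldl_addlike _ _
        (fun d y => ∃ blk ∈ PySem.List.pyRange (10 ^ (d - 1).toNat) (10 ^ d.toNat) 1,
          y = (PySem.List.pyRange 0 (PySem.Int.floordiv len d) 1).foldl
            (fun v _ => v * 10 ^ d.toNat + blk) 0)
        (fun s d y => PySem.Set.mem_foldl_add
          (PySem.List.pyRange (10 ^ (d - 1).toNat) (10 ^ d.toNat) 1)
          (fun blk => (PySem.List.pyRange 0 (PySem.Int.floordiv len d) 1).foldl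
            (fun v _ => v * 10 ^ d.toNat + blk) 0) s y) s y)]
  constructor
  · rintro (h | ⟨len, hlen, d, hd, blk, hblk, hval⟩)
    · simp [PySem.Set.empty] at h
    rw [List.mem_filter] at hd
    obtain ⟨hdmem, hdmod⟩ := hd
    rw [PySem.List.mem_pyRange_one] at hlen hdmem hblk
    have hd1 : 1 ≤ d := hdmem.1
    have hlen2 : 2 ≤ len := hlen.1
    have hdvd : d ∣ len := by
      rw [beq_iff_eq, PySem.Int.mod_eq_zero_iff_dvd] at hdmod
      exact hdmod
    set dn := d.toNat with hdn
    have hdn1 : 1 ≤ dn := by omega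
    have hdc : d = ((dn : Nat) : Int) := (Int.toNat_of_nonneg (by omega)).symm
    have hdnd : dn ∣ len.toNat := by
      obtain ⟨c, hc⟩ := hdvd
      refine ⟨c.toNat, ?_⟩
      have hc0 : 0 ≤ c := by nlinarith
      have h1 : len = ((dn * c.toNat : Nat) : Int) := by
        rw [hc, hdc]
        push_cast
        rw [Int.toNat_of_nonneg hc0]
      omega
    set q := len.toNat / dn with hq
    have hlq : len.toNat = q * dn := by
      obtain ⟨c, hc⟩ := hdnd
      rw [hq, hc, Nat.mul_div_cancel_left _ (by omega)]
      ring
    have hq2 : 2 ≤ q := by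
      have hdlen : d < len := hdmem.2
      rcases Nat.lt_or_ge q 2 with hcon | hcon
      · exfalso
        have h1 : q * dn ≤ 1 * dn := Nat.mul_le_mul_right dn (by omega)
        rw [one_mul] at h1
        rw [← hlq] at h1
        omega
      · exact hcon
    have hblk0 : 0 ≤ blk := by
      have h1 : (0:Int) < 10 ^ (d - 1).toNat := by positivity
      omega
    have hbge : 10 ^ (dn - 1) ≤ blk.toNat := by
      have h1 : ((10 ^ (dn - 1) : Nat) : Int) ≤ blk := by
        have he : ((10 ^ (dn - 1) : Nat) : Int) = (10:Int) ^ (d - 1).toNat := by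
          rw [show (d - 1).toNat = dn - 1 by omega]
          push_cast
          ring
        rw [he]
        exact hblk.1
      omega
    have hblt : blk.toNat < 10 ^ dn := by
      have h2 : blk < ((10 ^ dn : Nat) : Int) := by
        have he : ((10 ^ dn : Nat) : Int) = (10:Int) ^ dn := by push_cast; ring
        rw [he]
        exact hblk.2
      omega
    rw [val_eq len d blk hd1 (by omega) hblk0] at hval
    refine ⟨by rw [hval]; positivity, ⟨dn, q, blk.toNat, hdn1, hq2, hbge, hblt, by
      rw [hval, Int.toNat_natCast]⟩, ?_⟩
    have hlendstr : (dstr y.toNat).length = q * dn :=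
      length_dstr_of_RepN _ dn q blk.toNat hdn1 hq2 hbge hblt (by rw [hval, Int.toNat_natCast])
    have hLL : (dstr y.toNat).length = len.toNat := by rw [hlendstr, ← hlq]
    rw [hLL]
    omega
  · rintro ⟨hy0, ⟨d, q, b, hd1, hq2, hb1, hb2, hm⟩, hlen⟩
    right
    have hlendstr : (dstr y.toNat).length = q * d :=
      length_dstr_of_RepN _ d q b hd1 hq2 hb1 hb2 hm
    refine ⟨((q * d : Nat) : Int), ?_, ((d : Nat) : Int), ?_, ((b : Nat) : Int), ?_, ?_⟩
    · rw [PySem.List.mem_pyRange_one]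
      constructor
      · have h21 : 2 ≤ q * d := by
          have := Nat.mul_le_mul hq2 hd1
          omega
        exact_mod_cast h21
      · rw [hlendstr] at hlen
        omega
    · rw [List.mem_filter, PySem.List.mem_pyRange_one]
      refine ⟨⟨by exact_mod_cast hd1, ?_⟩, ?_⟩
      · have h2d : d < q * d := by
          have := Nat.mul_le_mul_right d hq2
          omega
        exact_mod_cast h2d
      · rw [beq_iff_eq, PySem.Int.mod_eq_zero_iff_dvd]
        exact ⟨(q : Int), by push_cast; ring⟩
    · rw [PySem.List.mem_pyRange_one]
      constructor
      · rw [show (((d : Nat) : Int) - 1).toNat = d - 1 by omega]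
        exact_mod_cast hb1
      · rw [Int.toNat_natCast]
        exact_mod_cast hb2
    · rw [val_eq _ _ _ (by exact_mod_cast hd1) (by positivity) (by positivity)]
      rw [Int.toNat_natCast, Int.toNat_natCast, Int.toNat_natCast,
        Nat.mul_div_cancel _ (by omega)]
      rw [← hm]
      omega

theorem nodup_reps (nd : Int) :
    List.Nodup ((PySem.List.pyRange 2 (nd + 1) 1).foldl (fun reps len =>
      (PySem.List.pyRange 1 len 1).foldl (fun reps d =>
        if PySem.Int.mod len d == 0 then
          (PySem.List.pyRange (10 ^ (d - 1).toNat) (10 ^ d.toNat) 1).foldl (fun reps block =>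
            PySem.Set.add reps
              ((PySem.List.pyRange 0 (PySem.Int.floordiv len d) 1).foldl
                (fun v _ => v * 10 ^ d.toNat + block) 0)) reps
        else reps) reps) PySem.Set.empty) := by
  refine nodup_foldl_of_step _ _ (fun s len hs => ?_) _ List.nodup_nil
  refine nodup_foldl_of_step _ _ (fun s d hs => ?_) _ hs
  split_ifs
  · exact nodup_foldl_of_step _ _ (fun s blk hs => PySem.Set.nodup_add _ _ hs) _ hs
  · exact hs

def hiMaxOf (data : List (List Int)) : Int :=
  if data.map (fun iv => PySem.List.pyGetD iv 1 0) = [] then 0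
  else (PySem.List.max? (data.map (fun iv => PySem.List.pyGetD iv 1 0)) (fun x => x)).getD 0

def repsOf (hiMax : Int) : PySem.Set Int :=
  (PySem.List.pyRange 2 (((PySem.Int.toChars (max hiMax 0)).length : Int) + 1) 1).foldl
    (fun reps len =>
      (PySem.List.pyRange 1 len 1).foldl (fun reps d =>
        if PySem.Int.mod len d == 0 then
          (PySem.List.pyRange (10 ^ (d - 1).toNat) (10 ^ d.toNat) 1).foldl (fun reps block =>
            PySem.Set.add reps
              ((PySem.List.pyRange 0 (PySem.Int.floordiv len d) 1).foldl
                (fun v _ => v * 10 ^ d.toNat + block) 0)) reps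
        else reps) reps) PySem.Set.empty

theorem interval_sum_eq (lo hi hiMax : Int) (hhi : hi ≤ hiMax) :
    ((PySem.List.pyRange lo (hi + 1) 1).filter repTestA).sum =
    ((repsOf hiMax).filter (fun r => decide (lo ≤ r ∧ r ≤ hi))).sum := by
  have hnd : ((PySem.Int.toChars (max hiMax 0)).length : Int)
      = ((dstr (max hiMax 0).toNat).length : Int) := by
    rw [toChars_nonneg _ (le_max_right _ _)]
  apply List.Perm.sum_eq
  unfold repsOf
  rw [List.perm_ext_iff_of_nodup ((nodup_pyRange_one _ _).filter _)
    ((nodup_reps _).filter _)]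
  intro y
  rw [List.mem_filter, List.mem_filter, PySem.List.mem_pyRange_one, mem_reps_iff]
  constructor
  · rintro ⟨⟨h1, h2⟩, htest⟩
    rw [repTestA_iff] at htest
    obtain ⟨hy0, hrep⟩ := htest
    refine ⟨⟨hy0, hrep, ?_⟩, by rw [decide_eq_true_eq]; omega⟩
    have hmono := length_dstr_mono y.toNat (max hiMax 0).toNat (by omega)
    rw [hnd]
    exact_mod_cast hmono
  · rintro ⟨⟨hy0, hrep, _⟩, hbound⟩
    rw [decide_eq_true_eq] at hbound
    refine ⟨⟨hbound.1, by omega⟩, ?_⟩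
    rw [repTestA_iff]
    exact ⟨hy0, hrep⟩

theorem part2_alt_eq (data : List (List Int)) :
    part2_alt data = (data.map (fun iv =>
      ((repsOf (hiMaxOf data)).filter (fun r =>
        decide (PySem.List.pyGetD iv 0 0 ≤ r ∧ r ≤ PySem.List.pyGetD iv 1 0))).sum)).sum := rfl

theorem part2_eq (data : List (List Int)) (hpre : Pre_part2 data) :
    part2 data = (data.map (fun iv =>
      ((PySem.List.pyRange (PySem.List.pyGetD iv 0 0) (PySem.List.pyGetD iv 1 0 + 1) 1).filter
        repTestA).sum)).sum := by
  unfold part2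
  refine Eq.trans (PySem.List.foldl_congr_mem _ _ (fun (total : Int) iv =>
    total + ((PySem.List.pyRange (PySem.List.pyGetD iv 0 0) (PySem.List.pyGetD iv 1 0 + 1) 1).filter
      repTestA).sum) _ ?_) ?_
  swap
  · rw [PySem.List.foldl_add]
    simp
  · intro total iv hiv
    have h2 : 2 ≤ iv.length := hpre iv hiv
    have h0 : PySem.List.pyGet? iv 0 = some (PySem.List.pyGetD iv 0 0) := by
      have a := PySem.List.pyGet?_ofNat iv 0 (by omega)
      have b := PySem.List.pyGetD_ofNat iv 0 (0:Int) (by omega)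
      push_cast at a b
      rw [a, b]
    have h1 : PySem.List.pyGet? iv 1 = some (PySem.List.pyGetD iv 1 0) := by
      have a := PySem.List.pyGet?_ofNat iv 1 (by omega)
      have b := PySem.List.pyGetD_ofNat iv 1 (0:Int) (by omega)
      push_cast at a b
      rw [a, b]
    rw [h0, h1]
    show (PySem.List.pyRange (PySem.List.pyGetD iv 0 0) (PySem.List.pyGetD iv 1 0 + 1) 1).foldl
      (fun total num => if repTestA num then total + num else total) total = _
    rw [PySem.List.foldl_if_eq_foldl_filter repTestA (fun t (x : Int) => t + x)]
    rw [show (fun (t x : Int) => t + x) = (fun (t x : Int) => t + (fun y : Int => y) x) from rfl,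
      PySem.List.foldl_add]
    simp

theorem main_eq (data : List (List Int)) (hpre : Pre_part2 data) :
    part2 data = part2_alt data := by
  rw [part2_eq data hpre, part2_alt_eq]
  congr 1
  apply List.map_congr_left
  intro iv hiv
  apply interval_sum_eq
  have hmem : PySem.List.pyGetD iv 1 0 ∈ data.map (fun iv => PySem.List.pyGetD iv 1 0) :=
    List.mem_map.mpr ⟨iv, hiv, rfl⟩
  have hne : data.map (fun iv => PySem.List.pyGetD iv 1 0) ≠ [] := by
    intro h
    rw [h] at hmem
    exact absurd hmem (List.not_mem_nil)
  unfold hiMaxOf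
  rw [if_neg hne]
  have hsome : PySem.List.max? (data.map (fun iv => PySem.List.pyGetD iv 1 0))
      (fun x : Int => x) ≠ none :=
    fun h => hne ((PySem.List.max?_eq_none_iff _ _).mp h)
  obtain ⟨m, hm⟩ := Option.ne_none_iff_exists'.mp hsome
  rw [hm]
  exact PySem.List.max?_isMax hm _ hmem


-- ===== VERDICT (by name: the statement is the Claim_ definition above) =====
theorem part2_spec : Claim_equal_part2 := by
  intro data _ hpre
  unfold Spec_part2
  exact main_eq data hpre
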